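-- pv_equiv track=rewrite | github.com/hwuestenberg/uncertainty_identifier | uncert_ident/methods/classification.py | get_scenario_set_variants
-- ===== SOURCE A (Python) =====
-- from itertools import combinations
--
-- def get_sample_group_names(dataset):
--     """
--     Setup the list of cases for a defined test scenario.
--     :param dataset: String for a test scenario.
--     :return: list of hold-out and test data.
--     """
--
--     if dataset == 'sep':
--         cases = [
--             "PH-Breuer",
--             "PH-Xiao",
--             "CBFS-Bentaleb",
--         ]
--     elif dataset == 'ph':
--         cases = [
--             "PH-Breuer",
--             "PH-Xiao",
--         ]
--     elif dataset == 'pg':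
--         cases = [
--             "NACA",
--             "TBL-APG",
--         ]
--     else:
--         cases = [
--             "PH-Breuer",
--             "CBFS-Bentaleb",
--             "NACA",
--             "TBL-APG",
--             "PH-Xiao",
--         ]
--
--     return cases
--
-- def get_scenario_set_variants(scenario):
--     sset_names = get_sample_group_names(scenario)
--     train_name_sets = [list(train) for train in list(combinations(sset_names, r=len(sset_names)-1))]
--     test_names = list()
--     for train_name_set in train_name_sets:
--         for sset_name in sset_names:
--             if sset_name not in train_name_set:
--                 test_names.append(sset_name)
--             else:
--                 pass
--     group_names = [train_list + [test_list] for train_list, test_list in zip(train_name_sets, test_names)]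
--
--     return group_names
-- ===== SOURCE B (Python) =====
-- def get_sample_group_names(dataset):
--     if dataset == 'sep':
--         cases = ["PH-Breuer", "PH-Xiao", "CBFS-Bentaleb"]
--     elif dataset == 'ph':
--         cases = ["PH-Breuer", "PH-Xiao"]
--     elif dataset == 'pg':
--         cases = ["NACA", "TBL-APG"]
--     else:
--         cases = ["PH-Breuer", "CBFS-Bentaleb", "NACA", "TBL-APG", "PH-Xiao"]
--     return cases
--
-- def get_scenario_set_variants(scenario):
--     names = get_sample_group_names(scenario)
--     n = len(names)
--     result = []
--     for i in reversed(range(n)):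
--         train = [names[j] for j in range(n) if j != i]
--         result.append(train + [names[i]])
--     return result
-- ===== Notes on version B (the rewrite author's own statement) =====
-- stated objective: simpler
-- what changed: Replaces itertools.combinations plus a nested membership scan and zip with a single direct loop over the excluded index (in reverse), building each train set and appending the held-out name in one pass.
import Mathlib
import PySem

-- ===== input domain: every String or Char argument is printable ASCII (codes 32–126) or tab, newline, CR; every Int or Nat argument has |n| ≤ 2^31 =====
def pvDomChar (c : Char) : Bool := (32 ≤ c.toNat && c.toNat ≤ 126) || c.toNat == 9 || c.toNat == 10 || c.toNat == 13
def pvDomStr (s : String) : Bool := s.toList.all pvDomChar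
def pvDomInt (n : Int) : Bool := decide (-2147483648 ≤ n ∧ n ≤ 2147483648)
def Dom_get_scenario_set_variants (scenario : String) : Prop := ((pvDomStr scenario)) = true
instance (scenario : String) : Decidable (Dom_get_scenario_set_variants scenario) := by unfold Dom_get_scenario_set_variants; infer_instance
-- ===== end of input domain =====

-- B replaces combinations + nested membership scan + zip by one direct loop over the excluded index (simpler, same cost).

-- ===== PORT A =====
-- shared helper (same function in both Python sources)
def get_sample_group_names (dataset : String) : List String :=
  if dataset = "sep" then ["PH-Breuer", "PH-Xiao", "CBFS-Bentaleb"]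
  else if dataset = "ph" then ["PH-Breuer", "PH-Xiao"]
  else if dataset = "pg" then ["NACA", "TBL-APG"]
  else ["PH-Breuer", "CBFS-Bentaleb", "NACA", "TBL-APG", "PH-Xiao"]

-- itertools.combinations(xs, r), lexicographic order (exact port of its semantics)
def pyCombinations (xs : List String) (r : Nat) : List (List String) :=
  match r, xs with
  | 0, _ => [[]]
  | _+1, [] => []
  | Nat.succ r', x :: rest => (pyCombinations rest r').map (fun c => x :: c) ++ pyCombinations rest (r' + 1)

def get_scenario_set_variants (scenario : String) : List (List String) :=
  let sset_names := get_sample_group_names scenario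
  let train_name_sets := pyCombinations sset_names (sset_names.length - 1)
  let test_names := train_name_sets.foldl (init := ([] : List String)) fun acc t =>
    sset_names.foldl (init := acc) fun acc2 n =>
      if t.contains n then acc2 else acc2 ++ [n]
  (train_name_sets.zip test_names).map (fun p => p.1 ++ [p.2])

-- ===== PORT B =====
def get_scenario_set_variants_alt (scenario : String) : List (List String) :=
  let names := get_sample_group_names scenario
  let n := names.length
  (List.range n).reverse.foldl (init := ([] : List (List String))) fun acc i =>
    acc ++ [((List.range n).filter (fun j => j ≠ i)).map (fun j => names.getD j "") ++ [names.getD i ""]]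

-- ===== PRECONDITION & SPEC =====
def Spec_get_scenario_set_variants (scenario : String) (out : List (List String)) : Prop := out = get_scenario_set_variants_alt scenario
instance (scenario : String) (out : List (List String)) : Decidable (Spec_get_scenario_set_variants scenario out) := by unfold Spec_get_scenario_set_variants; infer_instance

-- ===== CLAIM (what is proved, stated in full; the proofs are below) =====
def Claim_equal_get_scenario_set_variants : Prop := ∀ (scenario : String), Dom_get_scenario_set_variants scenario → Spec_get_scenario_set_variants scenario (get_scenario_set_variants scenario)

-- ===== LEMMAS AND PROOFS =====

-- ===== VERDICT (by name: the statement is the Claim_ definition above) =====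
theorem get_scenario_set_variants_spec : Claim_equal_get_scenario_set_variants := by
  intro s _
  unfold Spec_get_scenario_set_variants get_scenario_set_variants get_scenario_set_variants_alt get_sample_group_names
  split_ifs <;> decide
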